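-- pv_equiv track=rewrite | github.com/yujeongkimm/algorithm | 프로그래머스/unrated/138477. 명예의 전당 （1）/명예의 전당 （1）.py | solution
-- ===== SOURCE A (Python) =====
-- def solution(k, score):
--     answer,honor = [], []
--     for i in score:
--         if len(honor)<k:
--             honor.append(i)
--         else:
--             if i>min(honor):
--                 honor.pop(0)
--                 honor.append(i)
--         honor.sort()
--         answer.append(honor[0])
--     return answer
-- ===== SOURCE B (Python) =====
-- def _insert(h, x):
--     # h is sorted ascending; insert x after any equal elements
--     j = 0
--     while j < len(h) and h[j] <= x:
--         j += 1
--     return h[:j] + [x] + h[j:]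
--
-- def solution(k, score):
--     answer = []
--     honor = []  # invariant: sorted ascending, the k largest so far
--     for x in score:
--         if len(honor) < k:
--             honor = _insert(honor, x)
--         elif honor[0] < x:
--             honor = _insert(honor[1:], x)
--         answer.append(honor[0])
--     return answer
-- ===== Notes on version B (the rewrite author's own statement) =====
-- stated objective: alternative
-- what changed: B keeps the top-k list sorted as an invariant and places each new score by a single positional insertion, instead of A's append/pop followed by a full re-sort of the list on every iteration.
import Mathlib
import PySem

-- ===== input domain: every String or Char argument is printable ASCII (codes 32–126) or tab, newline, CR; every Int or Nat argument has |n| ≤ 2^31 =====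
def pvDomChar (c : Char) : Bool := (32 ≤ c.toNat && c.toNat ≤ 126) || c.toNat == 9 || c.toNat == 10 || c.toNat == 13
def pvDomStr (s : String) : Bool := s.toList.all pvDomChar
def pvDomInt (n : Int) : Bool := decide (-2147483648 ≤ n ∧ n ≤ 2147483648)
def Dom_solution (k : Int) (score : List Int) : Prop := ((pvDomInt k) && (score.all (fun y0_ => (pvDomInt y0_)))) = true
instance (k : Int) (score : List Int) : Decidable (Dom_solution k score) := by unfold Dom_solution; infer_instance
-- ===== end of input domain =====

-- B maintains the sorted top-k list incrementally by positional insertion instead of re-sorting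
-- every step (objective: alternative).  Both programs raise on k ≤ 0 with nonempty score (outside Pre_).

-- ===== PORT A =====
-- honor.pop(0) with the popped value discarded is rendered as honor.tail (exact for nonempty honor,
-- the only case reachable under Pre_: the branch requires len(honor) ≥ k ≥ 1).
def solution (k : Int) (score : List Int) : List Int :=
  (score.foldl (fun (st : List Int × List Int) i =>
      let honor := st.2
      let honor1 :=
        if (honor.length : Int) < k then honor ++ [i]
        else if (PySem.List.min? honor (fun y => y)).getD 0 < i then honor.tail ++ [i]
        else honor
      let honor2 := PySem.List.sorted honor1 (fun y => y) false
      (st.1 ++ [(PySem.List.pyGet? honor2 0).getD 0], honor2))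
    ([], [])).1

-- ===== PORT B =====
-- the while-loop scan for the insertion position in Source B's _insert
def pvInsPos : List Int → Int → Nat
  | [], _ => 0
  | a :: t, x => if a ≤ x then pvInsPos t x + 1 else 0

def pvInsert (h : List Int) (x : Int) : List Int :=
  h.take (pvInsPos h x) ++ [x] ++ h.drop (pvInsPos h x)

def solution_alt (k : Int) (score : List Int) : List Int :=
  (score.foldl (fun (st : List Int × List Int) x =>
      let honor :=
        if (st.2.length : Int) < k then pvInsert st.2 x
        else if (PySem.List.pyGet? st.2 0).getD 0 < x then pvInsert st.2.tail x
        else st.2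
      (st.1 ++ [(PySem.List.pyGet? honor 0).getD 0], honor))
    ([], [])).1

-- ===== PRECONDITION & SPEC =====
-- Pre_ excludes k ≤ 0 with nonempty score: there A raises ValueError (min of the empty honor list).
def Pre_solution (k : Int) (score : List Int) : Prop := score = [] ∨ 1 ≤ k
instance (k : Int) (score : List Int) : Decidable (Pre_solution k score) := by unfold Pre_solution; infer_instance
def pvWitness_solution : Int × List Int := (3, [10, 100, 20, 150, 1, 100, 200])

def Spec_solution (k : Int) (score : List Int) (out : List Int) : Prop := out = solution_alt k score
instance (k : Int) (score : List Int) (out : List Int) : Decidable (Spec_solution k score out) := by unfold Spec_solution; infer_instance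

-- ===== CLAIM (what is proved, stated in full; the proofs are below) =====
def Claim_equal_solution : Prop := ∀ (k : Int) (score : List Int), Dom_solution k score → Pre_solution k score → Spec_solution k score (solution k score)

-- ===== LEMMAS AND PROOFS =====

lemma pvInsert_perm (h : List Int) (x : Int) : (pvInsert h x).Perm (h ++ [x]) := by
  induction h with
  | nil => simp [pvInsert, pvInsPos]
  | cons a t ih =>
      by_cases hax : a ≤ x
      · simpa [pvInsert, pvInsPos, hax] using (List.Perm.cons a (by simpa [pvInsert] using ih))
      · simpa [pvInsert, pvInsPos, hax] using (List.perm_append_singleton x (a :: t)).symm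

lemma mem_pvInsert {h : List Int} {x y : Int} (hy : y ∈ pvInsert h x) : y = x ∨ y ∈ h := by
  have := (pvInsert_perm h x).mem_iff.mp hy
  simp at this
  tauto

lemma pvInsert_pairwise {h : List Int} (x : Int) (hs : h.Pairwise (· ≤ ·)) :
    (pvInsert h x).Pairwise (· ≤ ·) := by
  induction h with
  | nil => simp [pvInsert, pvInsPos]
  | cons a t ih =>
      rcases List.pairwise_cons.mp hs with ⟨ha, ht⟩
      by_cases hax : a ≤ x
      · have htail : (pvInsert t x).Pairwise (· ≤ ·) := ih ht
        have hhead : ∀ y ∈ pvInsert t x, a ≤ y := by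
          intro y hy
          rcases mem_pvInsert hy with rfl | hy'
          · exact hax
          · exact ha y hy'
        have : pvInsert (a :: t) x = a :: pvInsert t x := by
          simp [pvInsert, pvInsPos, hax]
        rw [this]
        exact List.pairwise_cons.mpr ⟨hhead, htail⟩
      · have hxa : x ≤ a := le_of_lt (lt_of_not_ge hax)
        have : pvInsert (a :: t) x = x :: a :: t := by
          simp [pvInsert, pvInsPos, hax]
        rw [this]
        refine List.pairwise_cons.mpr ⟨?_, hs⟩
        intro y hy
        rcases List.mem_cons.mp hy with rfl | hy'
        · exact hxa
        · exact le_trans hxa (ha y hy')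

lemma sorted_append_single {h : List Int} (x : Int) (hs : h.Pairwise (· ≤ ·)) :
    PySem.List.sorted (h ++ [x]) (fun y => y) false = pvInsert h x :=
  PySem.List.sorted_id_eq_of_perm_of_pairwise (h ++ [x]) (pvInsert h x) (pvInsert_perm h x) (pvInsert_pairwise x hs)

lemma min_head {a : Int} {t : List Int} (hp : (a :: t).Pairwise (· ≤ ·)) :
    PySem.List.min? (a :: t) (fun y => y) = some a := by
  rcases hmin : PySem.List.min? (a :: t) (fun y => y) with _ | m
  · exact absurd ((PySem.List.min?_eq_none_iff (a :: t) (fun y => y)).mp hmin) (by simp)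
  · have hmem : m ∈ a :: t := PySem.List.min?_mem hmin
    have hle : m ≤ a := PySem.List.min?_isMin hmin a (by simp)
    rcases List.mem_cons.mp hmem with rfl | hm
    · rfl
    · have : a ≤ m := (List.pairwise_cons.mp hp).1 m hm
      have : m = a := le_antisymm hle this
      simp [this]

-- the two loop bodies agree step by step on a sorted honor state
lemma loop_eq (k : Int) (hk : 1 ≤ k) :
    ∀ (score : List Int) (ans honor : List Int), honor.Pairwise (· ≤ ·) →
    (score.foldl (fun (st : List Int × List Int) i =>
      let honor := st.2
      let honor1 :=
        if (honor.length : Int) < k then honor ++ [i]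
        else if (PySem.List.min? honor (fun y => y)).getD 0 < i then honor.tail ++ [i]
        else honor
      let honor2 := PySem.List.sorted honor1 (fun y => y) false
      (st.1 ++ [(PySem.List.pyGet? honor2 0).getD 0], honor2)) (ans, honor))
    =
    (score.foldl (fun (st : List Int × List Int) x =>
      let honor :=
        if (st.2.length : Int) < k then pvInsert st.2 x
        else if (PySem.List.pyGet? st.2 0).getD 0 < x then pvInsert st.2.tail x
        else st.2
      (st.1 ++ [(PySem.List.pyGet? honor 0).getD 0], honor)) (ans, honor)) := by
  intro score
  induction score with
  | nil => intro ans honor _; rfl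
  | cons i rest ih =>
      intro ans honor hs
      by_cases hlen : (honor.length : Int) < k
      · -- fill phase: both insert i into honor keeping it sorted
        simp only [List.foldl_cons, hlen, if_pos]
        rw [sorted_append_single i hs]
        exact ih _ _ (pvInsert_pairwise i hs)
      · -- honor is full, hence nonempty since k ≥ 1
        obtain ⟨a, t, rfl⟩ : ∃ a t, honor = a :: t := by
          rcases honor with _ | ⟨a, t⟩
          · exfalso; apply hlen; simpa using hk
          · exact ⟨a, t, rfl⟩
        simp only [List.foldl_cons, hlen, if_neg, not_false_iff]
        rw [min_head hs]
        by_cases hai : a < i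
        · have hget : (PySem.List.pyGet? (a :: t) 0).getD 0 = a := by
            simp
          simp only [Option.getD_some, hget, hai, if_pos, List.tail_cons]
          have hts : t.Pairwise (· ≤ ·) := (List.pairwise_cons.mp hs).2
          rw [sorted_append_single i hts]
          exact ih _ _ (pvInsert_pairwise i hts)
        · have hget : (PySem.List.pyGet? (a :: t) 0).getD 0 = a := by
            simp
          have hsort : PySem.List.sorted (a :: t) (fun y => y) false = a :: t :=
            PySem.List.sorted_eq_self_of_pairwise (a :: t) (fun y => y) hs
          simp only [Option.getD_some, hget, hai, if_neg, not_false_iff, hsort]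
          exact ih _ _ hs

-- ===== VERDICT (by name: the statement is the Claim_ definition above) =====
theorem solution_spec : Claim_equal_solution := by
  intro k score _ hpre
  rcases hpre with rfl | hk
  · rfl
  · show solution k score = solution_alt k score
    unfold solution solution_alt
    rw [loop_eq k hk score [] [] (by simp)]
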